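-- pv_equiv track=rewrite | github.com/topmcon/Ai-Catlog-Bot | main.py | find_matching_variant
-- ===== SOURCE A (Python) =====
-- def generate_model_variations(model_number: str) -> list:
--     """
--     Generate common model number format variations for smart matching.
--     Returns list of possible variations to try.
--     """
--     model = model_number.strip()
--     variations = [model]  # Original
--
--     # Common brand prefixes
--     prefixes = ["K-", "G-", "M-", "A-"]
--     for prefix in prefixes:
--         if not model.upper().startswith(prefix.upper()):
--             variations.append(f"{prefix}{model}")
--
--     # Add/remove hyphens
--     if "-" in model:
--         variations.append(model.replace("-", ""))  # Remove all hyphens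
--     else:
--         # Try adding hyphens in common positions
--         if len(model) > 4:
--             # Format: G9104BNI -> G-9104-BNI
--             if model[0].isalpha() and model[1:5].isdigit():
--                 variations.append(f"{model[0]}-{model[1:5]}-{model[5:]}")
--             # Format: 97621SHP -> 97621-SHP or UC15IP -> UC15-IP or UC-15IP
--             for i in range(2, len(model)-1):
--                 if model[i].isalpha() and model[i-1].isdigit():
--                     variations.append(f"{model[:i]}-{model[i:]}")  # UC15IP -> UC15-IP
--                 if model[i].isdigit() and model[i-1].isalpha() and i > 1:
--                     variations.append(f"{model[:i]}-{model[i:]}")  # UC15IP -> UC-15IP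
--
--     # Remove duplicates while preserving order
--     seen = set()
--     unique_variations = []
--     for v in variations:
--         v_upper = v.upper()
--         if v_upper not in seen:
--             seen.add(v_upper)
--             unique_variations.append(v)
--
--     return unique_variations
--
-- def find_matching_variant(search_results: dict, model_number: str, fuzzy: bool = False) -> tuple:
--     """
--     Find the variant that matches the requested model number.
--     Returns tuple: (variant_url, matched_model, match_type)
--
--     Match types: 'exact', 'variation', 'partial', None
--     """
--     model_upper = model_number.upper().strip()
--     variations = generate_model_variations(model_number) if fuzzy else [model_number]
--
--     # Try exact matches first
--     for variation in variations:
--         variation_upper = variation.upper().strip()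
--         for product in search_results.get("products", []):
--             for variant in product.get("variants", []):
--                 variant_model = variant.get("model_no", "").upper().strip()
--
--                 # Exact match
--                 if variant_model == variation_upper:
--                     match_type = 'exact' if variation == model_number else 'variation'
--                     return (variant.get("url"), variant.get("model_no"), match_type)
--
--     # Try partial matches (variant contains search term)
--     if fuzzy:
--         for product in search_results.get("products", []):
--             for variant in product.get("variants", []):
--                 variant_model = variant.get("model_no", "").upper().strip()
--
--                 # Partial match - variant contains model number
--                 if model_upper in variant_model or variant_model in model_upper:
--                     return (variant.get("url"), variant.get("model_no"), 'partial')
--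
--     return (None, None, None)
-- ===== SOURCE B (Python) =====
-- def generate_model_variations(model_number: str) -> list:
--     """
--     Generate common model number format variations for smart matching.
--     Returns list of possible variations to try.
--     """
--     model = model_number.strip()
--     variations = [model]  # Original
--
--     # Common brand prefixes
--     prefixes = ["K-", "G-", "M-", "A-"]
--     for prefix in prefixes:
--         if not model.upper().startswith(prefix.upper()):
--             variations.append(f"{prefix}{model}")
--
--     # Add/remove hyphens
--     if "-" in model:
--         variations.append(model.replace("-", ""))  # Remove all hyphens
--     else:
--         # Try adding hyphens in common positions
--         if len(model) > 4:
--             # Format: G9104BNI -> G-9104-BNI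
--             if model[0].isalpha() and model[1:5].isdigit():
--                 variations.append(f"{model[0]}-{model[1:5]}-{model[5:]}")
--             # Format: 97621SHP -> 97621-SHP or UC15IP -> UC15-IP or UC-15IP
--             for i in range(2, len(model)-1):
--                 if model[i].isalpha() and model[i-1].isdigit():
--                     variations.append(f"{model[:i]}-{model[i:]}")  # UC15IP -> UC15-IP
--                 if model[i].isdigit() and model[i-1].isalpha() and i > 1:
--                     variations.append(f"{model[:i]}-{model[i:]}")  # UC15IP -> UC-15IP
--
--     # Remove duplicates while preserving order
--     seen = set()
--     unique_variations = []
--     for v in variations: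
--         v_upper = v.upper()
--         if v_upper not in seen:
--             seen.add(v_upper)
--             unique_variations.append(v)
--
--     return unique_variations
--
--
-- def find_matching_variant(search_results: dict, model_number: str, fuzzy: bool = False) -> tuple:
--     """
--     Same result as the original, but the variants are flattened and indexed ONCE
--     in a first-occurrence-wins hash table keyed by normalized model_no, so the
--     exact-match phase does one dict lookup per variation instead of rescanning
--     every variant for every variation.
--     """
--     model_upper = model_number.upper().strip()
--     variations = generate_model_variations(model_number) if fuzzy else [model_number]
--
--     all_variants = [v for p in search_results.get("products", [])
--                       for v in p.get("variants", [])]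
--
--     index = {}
--     for v in all_variants:
--         index.setdefault(v.get("model_no", "").upper().strip(), v)
--
--     for variation in variations:
--         v = index.get(variation.upper().strip())
--         if v is not None:
--             match_type = 'exact' if variation == model_number else 'variation'
--             return (v.get("url"), v.get("model_no"), match_type)
--
--     if fuzzy:
--         for v in all_variants:
--             vm = v.get("model_no", "").upper().strip()
--             if model_upper in vm or vm in model_upper:
--                 return (v.get("url"), v.get("model_no"), 'partial')
--
--     return (None, None, None)
-- ===== Notes on version B (the rewrite author's own statement) =====
-- stated objective: alternative
-- what changed: Flattens all variants once and builds a first-occurrence-wins dict keyed by the normalized model_no, so the exact-match phase does one dict lookup per variation instead of rescanning every product's variants for every variation; the partial-match phase scans the flattened list once.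
import Mathlib
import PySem

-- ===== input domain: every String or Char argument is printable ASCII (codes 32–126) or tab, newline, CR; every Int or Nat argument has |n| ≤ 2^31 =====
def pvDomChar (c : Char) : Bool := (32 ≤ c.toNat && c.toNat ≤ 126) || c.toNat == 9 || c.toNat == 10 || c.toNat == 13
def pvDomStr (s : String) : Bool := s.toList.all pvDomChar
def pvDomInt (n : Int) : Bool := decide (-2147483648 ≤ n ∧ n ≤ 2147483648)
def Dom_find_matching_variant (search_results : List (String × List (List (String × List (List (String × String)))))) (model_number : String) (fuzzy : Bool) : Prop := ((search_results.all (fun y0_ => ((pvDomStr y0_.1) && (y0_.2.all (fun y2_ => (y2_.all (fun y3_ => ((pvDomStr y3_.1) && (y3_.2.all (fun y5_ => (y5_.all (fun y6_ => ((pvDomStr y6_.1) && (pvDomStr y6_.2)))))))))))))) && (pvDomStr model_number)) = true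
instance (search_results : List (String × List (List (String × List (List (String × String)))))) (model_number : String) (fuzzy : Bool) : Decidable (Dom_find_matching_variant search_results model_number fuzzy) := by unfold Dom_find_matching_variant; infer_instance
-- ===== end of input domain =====

-- B flattens the variants once and indexes them in a first-occurrence-wins dict keyed by
-- normalized model_no, replacing A's rescan of all variants for every variation (alternative).

-- shared language helper: Python's dict.get on an association list (first match)
def pyDictGet? {ν : Type} (d : List (String × ν)) (k : String) : Option ν :=
  (d.find? (fun p => p.1 == k)).map (·.2)

-- shared module helper (both Pythons call it): port of generate_model_variations
def generate_model_variations (model_number : String) : List String :=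
  let model := PySem.Str.strip model_number
  let variations := [model]
  let prefixes := ["K-", "G-", "M-", "A-"]
  let variations := prefixes.foldl (fun acc pfx =>
    if !(PySem.Str.startswith (PySem.Str.upper model) (PySem.Str.upper pfx)) then
      acc ++ [pfx ++ model]
    else acc) variations
  let variations :=
    if PySem.Str.isIn "-" model then
      variations ++ [PySem.Str.replace model "-" ""]
    else
      if PySem.Str.len model > 4 then
        let variations :=
          if (match PySem.Str.pyGet? model 0 with
              | some c => PySem.Chars.isalpha c
              | none => false)
             && PySem.Str.strIsdigit (PySem.Str.slice model (some 1) (some 5)) then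
            variations ++ [(match PySem.Str.pyGet? model 0 with
                            | some c => String.singleton c
                            | none => "") ++ "-" ++ PySem.Str.slice model (some 1) (some 5)
                           ++ "-" ++ PySem.Str.slice model (some 5) none]
          else variations
        (PySem.List.pyRange 2 (PySem.Str.len model - 1) 1).foldl (fun acc i =>
          let acc :=
            if (match PySem.Str.pyGet? model i with
                | some c => PySem.Chars.isalpha c
                | none => false)
               && (match PySem.Str.pyGet? model (i - 1) with
                   | some c => PySem.Chars.isdigit c
                   | none => false) then
              acc ++ [PySem.Str.slice model none (some i) ++ "-" ++ PySem.Str.slice model (some i) none]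
            else acc
          if (match PySem.Str.pyGet? model i with
              | some c => PySem.Chars.isdigit c
              | none => false)
             && (match PySem.Str.pyGet? model (i - 1) with
                 | some c => PySem.Chars.isalpha c
                 | none => false)
             && i > 1 then
            acc ++ [PySem.Str.slice model none (some i) ++ "-" ++ PySem.Str.slice model (some i) none]
          else acc) variations
      else variations
  (variations.foldl (fun (st : PySem.Set String × List String) v =>
      let vUpper := PySem.Str.upper v
      if PySem.Set.contains st.1 vUpper then st
      else (PySem.Set.add st.1 vUpper, st.2 ++ [v])) (PySem.Set.ofList [], [])).2

-- ===== PORT A =====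
-- A's inner two loops of the exact phase: first variant of this product list matching the variation
def aFindVariant (vu variation model_number : String) :
    List (List (String × String)) → Option (Option String × Option String × Option String)
  | [] => none
  | variant :: rest =>
    if PySem.Str.strip (PySem.Str.upper ((pyDictGet? variant "model_no").getD "")) == vu then
      some (pyDictGet? variant "url", pyDictGet? variant "model_no",
            some (if variation == model_number then "exact" else "variation"))
    else aFindVariant vu variation model_number rest

def aFindProducts (vu variation model_number : String) :
    List (List (String × List (List (String × String)))) →
    Option (Option String × Option String × Option String)
  | [] => none
  | product :: rest =>
    match aFindVariant vu variation model_number ((pyDictGet? product "variants").getD []) with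
    | some r => some r
    | none => aFindProducts vu variation model_number rest

def aPhase1 (model_number : String)
    (products : List (List (String × List (List (String × String))))) :
    List String → Option (Option String × Option String × Option String)
  | [] => none
  | variation :: rest =>
    match aFindProducts (PySem.Str.strip (PySem.Str.upper variation)) variation model_number products with
    | some r => some r
    | none => aPhase1 model_number products rest

def aPartialVariants (model_upper : String) :
    List (List (String × String)) → Option (Option String × Option String × Option String)
  | [] => none
  | variant :: rest =>
    let vm := PySem.Str.strip (PySem.Str.upper ((pyDictGet? variant "model_no").getD ""))
    if PySem.Str.isIn model_upper vm || PySem.Str.isIn vm model_upper then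
      some (pyDictGet? variant "url", pyDictGet? variant "model_no", some "partial")
    else aPartialVariants model_upper rest

def aPartialProducts (model_upper : String) :
    List (List (String × List (List (String × String)))) →
    Option (Option String × Option String × Option String)
  | [] => none
  | product :: rest =>
    match aPartialVariants model_upper ((pyDictGet? product "variants").getD []) with
    | some r => some r
    | none => aPartialProducts model_upper rest

def find_matching_variant (search_results : List (String × List (List (String × List (List (String × String)))))) (model_number : String) (fuzzy : Bool) : Option String × Option String × Option String :=
  let model_upper := PySem.Str.strip (PySem.Str.upper model_number)
  let variations := if fuzzy then generate_model_variations model_number else [model_number]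
  let products := (pyDictGet? search_results "products").getD []
  match aPhase1 model_number products variations with
  | some r => r
  | none =>
    if fuzzy then
      match aPartialProducts model_upper products with
      | some r => r
      | none => (none, none, none)
    else (none, none, none)

-- ===== PORT B =====
-- B's exact phase: one dict lookup per variation (dict built once, first occurrence wins)
def bScanVariations (index : PySem.Dict String (List (String × String))) (model_number : String) :
    List String → Option (Option String × Option String × Option String)
  | [] => none
  | variation :: rest =>
    match PySem.Dict.get? index (PySem.Str.strip (PySem.Str.upper variation)) with
    | some v =>
      some (pyDictGet? v "url", pyDictGet? v "model_no",
            some (if variation == model_number then "exact" else "variation"))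
    | none => bScanVariations index model_number rest

def bPartial (model_upper : String) :
    List (List (String × String)) → Option (Option String × Option String × Option String)
  | [] => none
  | v :: rest =>
    let vm := PySem.Str.strip (PySem.Str.upper ((pyDictGet? v "model_no").getD ""))
    if PySem.Str.isIn model_upper vm || PySem.Str.isIn vm model_upper then
      some (pyDictGet? v "url", pyDictGet? v "model_no", some "partial")
    else bPartial model_upper rest

def find_matching_variant_alt (search_results : List (String × List (List (String × List (List (String × String)))))) (model_number : String) (fuzzy : Bool) : Option String × Option String × Option String :=
  let model_upper := PySem.Str.strip (PySem.Str.upper model_number)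
  let variations := if fuzzy then generate_model_variations model_number else [model_number]
  let all_variants :=
    ((pyDictGet? search_results "products").getD []).flatMap
      (fun p => (pyDictGet? p "variants").getD [])
  let index := all_variants.foldl (fun d v =>
    PySem.Dict.setdefault d (PySem.Str.strip (PySem.Str.upper ((pyDictGet? v "model_no").getD ""))) v)
    PySem.Dict.empty
  match bScanVariations index model_number variations with
  | some r => r
  | none =>
    if fuzzy then
      match bPartial model_upper all_variants with
      | some r => r
      | none => (none, none, none)
    else (none, none, none)

-- ===== PRECONDITION & SPEC =====
def Spec_find_matching_variant (search_results : List (String × List (List (String × List (List (String × String)))))) (model_number : String) (fuzzy : Bool) (out : Option String × Option String × Option String) : Prop := out = find_matching_variant_alt search_results model_number fuzzy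
instance (search_results : List (String × List (List (String × List (List (String × String)))))) (model_number : String) (fuzzy : Bool) (out : Option String × Option String × Option String) : Decidable (Spec_find_matching_variant search_results model_number fuzzy out) := by unfold Spec_find_matching_variant; infer_instance

-- ===== CLAIM (what is proved, stated in full; the proofs are below) =====
def Claim_equal_find_matching_variant : Prop := ∀ (search_results : List (String × List (List (String × List (List (String × String)))))) (model_number : String) (fuzzy : Bool), Dom_find_matching_variant search_results model_number fuzzy → Spec_find_matching_variant search_results model_number fuzzy (find_matching_variant search_results model_number fuzzy)

-- ===== LEMMAS AND PROOFS =====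

-- the key under which a variant is indexed
def variantKey (v : List (String × String)) : String :=
  PySem.Str.strip (PySem.Str.upper ((pyDictGet? v "model_no").getD ""))

-- B's first-wins index lookup is A's linear scan over the same list
theorem get?_setdefault_foldl (l : List (List (String × String)))
    (d : PySem.Dict String (List (String × String))) (k : String) :
    (l.foldl (fun d v => PySem.Dict.setdefault d (variantKey v) v) d).get? k
      = (d.get? k).or (l.find? (fun v => variantKey v == k)) := by
  induction l generalizing d with
  | nil => simp
  | cons v t ih =>
    simp only [List.foldl_cons, List.find?_cons, ih]
    by_cases h : variantKey v = k
    · subst h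
      rw [PySem.Dict.get?_setdefault_self]
      simp only [beq_self_eq_true]
      cases d.get? (variantKey v) <;> simp
    · have hb : (variantKey v == k) = false := by simp [h]
      rw [PySem.Dict.get?_setdefault_of_ne d v (fun hk => h hk.symm)]
      simp [hb]

theorem aFindVariant_eq_find? (vu variation model_number : String)
    (l : List (List (String × String))) :
    aFindVariant vu variation model_number l
      = (l.find? (fun v => variantKey v == vu)).map (fun v =>
          (pyDictGet? v "url", pyDictGet? v "model_no",
           some (if variation == model_number then "exact" else "variation"))) := by
  induction l with
  | nil => simp [aFindVariant]
  | cons v t ih =>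
    by_cases h : variantKey v = vu
    · have hb : (variantKey v == vu) = true := by simp [h]
      simp only [aFindVariant, List.find?_cons, hb]
      simp only [variantKey] at h
      simp [h, Option.map_some]
    · have hb : (variantKey v == vu) = false := by simp [h]
      simp only [aFindVariant, List.find?_cons, hb]
      simp only [variantKey] at h
      simp [h, ih]

theorem aFindProducts_eq_flat (vu variation model_number : String)
    (products : List (List (String × List (List (String × String))))) :
    aFindProducts vu variation model_number products
      = aFindVariant vu variation model_number
          (products.flatMap (fun p => (pyDictGet? p "variants").getD [])) := by
  induction products with
  | nil => simp [aFindProducts, aFindVariant]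
  | cons p rest ih =>
    simp only [aFindProducts, List.flatMap_cons, ih,
      aFindVariant_eq_find?, List.find?_append]
    cases ((pyDictGet? p "variants").getD []).find? (fun v => variantKey v == vu) <;> simp

theorem aPhase1_eq_bScan (model_number : String)
    (products : List (List (String × List (List (String × String)))))
    (vs : List String) :
    aPhase1 model_number products vs
      = bScanVariations
          ((products.flatMap (fun p => (pyDictGet? p "variants").getD [])).foldl
            (fun d v =>
              PySem.Dict.setdefault d
                (PySem.Str.strip (PySem.Str.upper ((pyDictGet? v "model_no").getD ""))) v)
            PySem.Dict.empty)
          model_number vs := by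
  induction vs with
  | nil => simp [aPhase1, bScanVariations]
  | cons variation rest ih =>
    have hfold :
        ((products.flatMap (fun p => (pyDictGet? p "variants").getD [])).foldl
            (fun d v =>
              PySem.Dict.setdefault d
                (PySem.Str.strip (PySem.Str.upper ((pyDictGet? v "model_no").getD ""))) v)
            PySem.Dict.empty).get? (PySem.Str.strip (PySem.Str.upper variation))
          = (products.flatMap (fun p => (pyDictGet? p "variants").getD [])).find?
              (fun v => variantKey v == PySem.Str.strip (PySem.Str.upper variation)) := by
      have := get?_setdefault_foldl
        (products.flatMap (fun p => (pyDictGet? p "variants").getD []))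
        PySem.Dict.empty (PySem.Str.strip (PySem.Str.upper variation))
      simpa [variantKey] using this
    simp only [aPhase1, bScanVariations, ih, hfold,
      aFindProducts_eq_flat, aFindVariant_eq_find?]
    cases (products.flatMap (fun p => (pyDictGet? p "variants").getD [])).find?
        (fun v => variantKey v == PySem.Str.strip (PySem.Str.upper variation)) <;> simp

theorem aPartialVariants_eq_bPartial (model_upper : String)
    (l : List (List (String × String))) :
    aPartialVariants model_upper l = bPartial model_upper l := by
  induction l with
  | nil => rfl
  | cons v t ih => simp only [aPartialVariants, bPartial, ih]

theorem aPartialVariants_append (mu : String) (l1 l2 : List (List (String × String))) :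
    aPartialVariants mu (l1 ++ l2) = (aPartialVariants mu l1).or (aPartialVariants mu l2) := by
  induction l1 with
  | nil => simp [aPartialVariants]
  | cons v t ih =>
    simp only [List.cons_append, aPartialVariants, ih]
    split
    · rfl
    · rfl

theorem aPartialProducts_eq_flat (model_upper : String)
    (products : List (List (String × List (List (String × String))))) :
    aPartialProducts model_upper products
      = bPartial model_upper
          (products.flatMap (fun p => (pyDictGet? p "variants").getD [])) := by
  induction products with
  | nil => simp [aPartialProducts, bPartial]
  | cons p rest ih =>
    simp only [aPartialProducts, List.flatMap_cons, ih, ← aPartialVariants_eq_bPartial,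
      aPartialVariants_append]
    cases aPartialVariants model_upper ((pyDictGet? p "variants").getD []) <;> simp

-- ===== VERDICT (by name: the statement is the Claim_ definition above) =====
theorem find_matching_variant_spec : Claim_equal_find_matching_variant := by
  intro search_results model_number fuzzy _
  unfold Spec_find_matching_variant find_matching_variant find_matching_variant_alt
  simp only [aPhase1_eq_bScan, aPartialProducts_eq_flat]
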